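-- pv_equiv track=rewrite | github.com/Fleyderer/YandexTrainings | 1.0/HW2/E-CowChampionship.py | solution
-- ===== SOURCE A (Python) =====
-- def solution(competitors):
--     win_idx = 0
--     search_idx = 0
--     for i in range(1, len(competitors)):
--
--         if competitors[i] % 10 == 5:
--             if i + 1 < len(competitors) and competitors[i] > competitors[i + 1]:
--                 if search_idx == 0 or competitors[i] > competitors[search_idx]:
--                     search_idx = i
--
--         if competitors[i] > competitors[win_idx]:
--             win_idx = i
--             search_idx = 0
--
--     if search_idx == 0:
--         return 0
--
--     place = 1
--     for i in range(len(competitors)):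
--         place += competitors[i] > competitors[search_idx]
--     return place
-- ===== SOURCE B (Python) =====
-- def solution(competitors):
--     n = len(competitors)
--     if n < 2:
--         return 0
--     m = competitors.index(max(competitors))
--     best = None
--     for i in range(m + 1, n):
--         if competitors[i] % 10 == 5 and i + 1 < n and competitors[i] > competitors[i + 1]:
--             if best is None or competitors[i] > competitors[best]:
--                 best = i
--     if best is None:
--         return 0
--     bv = competitors[best]
--     return 1 + sum(1 for c in competitors if c > bv)
-- ===== Notes on version B (the rewrite author's own statement) =====
-- stated objective: alternative
-- what changed: B replaces A's single interleaved pass (running max whose updates reset the candidate search index) by an explicit decomposition: guard len<2, find the first occurrence of the maximum with index(max(...)), scan only the tail after it tracking the best candidate as an Option, then count strictly greater entries with sum().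
import Mathlib
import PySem

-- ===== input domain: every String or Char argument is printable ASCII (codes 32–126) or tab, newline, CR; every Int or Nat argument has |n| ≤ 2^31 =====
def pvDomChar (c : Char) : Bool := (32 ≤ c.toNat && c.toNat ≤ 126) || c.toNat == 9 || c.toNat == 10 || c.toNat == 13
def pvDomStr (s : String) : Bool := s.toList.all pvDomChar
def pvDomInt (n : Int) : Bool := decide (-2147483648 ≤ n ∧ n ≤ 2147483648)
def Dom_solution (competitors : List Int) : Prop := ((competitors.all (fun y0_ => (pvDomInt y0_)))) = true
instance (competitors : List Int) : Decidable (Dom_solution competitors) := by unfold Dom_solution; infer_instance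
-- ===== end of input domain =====

-- B replaces A's interleaved running-max-with-reset scan by an explicit argmax (index of max)
-- followed by a bounded tail scan tracking the best candidate as an Option (alternative decomposition).

-- ===== PORT A =====
-- A's single loop over i in range(1, n) carrying (win_idx, search_idx), then the counting loop.
def solution (competitors : List Int) : Int :=
  let n : Int := (competitors.length : Int)
  let st :=
    (PySem.List.pyRange 1 n 1).foldl
      (fun (st : Int × Int) i =>
        let s1 :=
          if PySem.Int.mod (PySem.List.pyGetD competitors i 0) 10 = 5 then
            if i + 1 < n ∧ PySem.List.pyGetD competitors (i + 1) 0 < PySem.List.pyGetD competitors i 0 then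
              if st.2 = 0 ∨ PySem.List.pyGetD competitors st.2 0 < PySem.List.pyGetD competitors i 0 then i
              else st.2
            else st.2
          else st.2
        if PySem.List.pyGetD competitors st.1 0 < PySem.List.pyGetD competitors i 0 then (i, (0 : Int))
        else (st.1, s1))
      ((0 : Int), (0 : Int))
  if st.2 = 0 then 0
  else
    (PySem.List.pyRange 0 n 1).foldl
      (fun place i =>
        place + (if PySem.List.pyGetD competitors st.2 0 < PySem.List.pyGetD competitors i 0 then 1 else 0))
      1

-- ===== PORT B =====
def solution_alt (competitors : List Int) : Int :=
  let n : Int := (competitors.length : Int)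
  if n < 2 then 0
  else
    match PySem.List.max? competitors (fun x => x) with
    | none => 0   -- unreachable: the list is nonempty here
    | some mx =>
      match PySem.List.index? competitors mx with
      | none => 0 -- unreachable: mx is an element
      | some m =>
        let best :=
          (PySem.List.pyRange ((m : Int) + 1) n 1).foldl
            (fun (best : Option Int) i =>
              if PySem.Int.mod (PySem.List.pyGetD competitors i 0) 10 = 5 ∧
                 i + 1 < n ∧ PySem.List.pyGetD competitors (i + 1) 0 < PySem.List.pyGetD competitors i 0 then
                match best with
                | none => some i
                | some j => if PySem.List.pyGetD competitors j 0 < PySem.List.pyGetD competitors i 0 then some i else best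
              else best)
            none
        match best with
        | none => 0
        | some j =>
          let bv := PySem.List.pyGetD competitors j 0
          1 + (competitors.countP (fun c => decide (bv < c)) : Int)

-- ===== PRECONDITION & SPEC =====
def Spec_solution (competitors : List Int) (out : Int) : Prop := out = solution_alt competitors
instance (competitors : List Int) (out : Int) : Decidable (Spec_solution competitors out) := by unfold Spec_solution; infer_instance

-- ===== CLAIM (what is proved, stated in full; the proofs are below) =====
def Claim_equal_solution : Prop := ∀ (competitors : List Int), Dom_solution competitors → Spec_solution competitors (solution competitors)

-- ===== LEMMAS AND PROOFS =====

-- value at index i (A and B both read via pyGetD with default 0; all reads are in range)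
def pvV (xs : List Int) (i : Int) : Int := PySem.List.pyGetD xs i 0

-- the body of A's main loop, named for the induction
def pvStepA (xs : List Int) (st : Int × Int) (i : Int) : Int × Int :=
  let n : Int := (xs.length : Int)
  let s1 :=
    if PySem.Int.mod (PySem.List.pyGetD xs i 0) 10 = 5 then
      if i + 1 < n ∧ PySem.List.pyGetD xs (i + 1) 0 < PySem.List.pyGetD xs i 0 then
        if st.2 = 0 ∨ PySem.List.pyGetD xs st.2 0 < PySem.List.pyGetD xs i 0 then i
        else st.2
      else st.2
    else st.2
  if PySem.List.pyGetD xs st.1 0 < PySem.List.pyGetD xs i 0 then (i, (0 : Int)) else (st.1, s1)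

-- the body of B's tail scan, named for the induction
def pvStepB (xs : List Int) (best : Option Int) (i : Int) : Option Int :=
  let n : Int := (xs.length : Int)
  if PySem.Int.mod (PySem.List.pyGetD xs i 0) 10 = 5 ∧
     i + 1 < n ∧ PySem.List.pyGetD xs (i + 1) 0 < PySem.List.pyGetD xs i 0 then
    match best with
    | none => some i
    | some j => if PySem.List.pyGetD xs j 0 < PySem.List.pyGetD xs i 0 then some i else best
  else best

def pvStA (xs : List Int) (k : Int) : Int × Int :=
  (PySem.List.pyRange 1 k 1).foldl (pvStepA xs) (0, 0)

def pvBest (xs : List Int) (a b : Int) : Option Int :=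
  (PySem.List.pyRange a b 1).foldl (pvStepB xs) none

def pvW (xs : List Int) (k : Int) : Int :=
  (PySem.List.pyRange 1 k 1).foldl
    (fun w i => if PySem.List.pyGetD xs w 0 < PySem.List.pyGetD xs i 0 then i else w) 0

lemma pvStepB_cases (xs : List Int) (o : Option Int) (i : Int) :
    pvStepB xs o i = o ∨ pvStepB xs o i = some i := by
  cases o <;> (simp only [pvStepB]; split_ifs <;> simp)

lemma pvFoldB_mem (xs : List Int) (l : List Int) :
    ∀ (o : Option Int) (j : Int), l.foldl (pvStepB xs) o = some j → o = some j ∨ j ∈ l := by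
  induction l with
  | nil => intro o j h; simp at h; exact Or.inl h
  | cons x t ih =>
    intro o j h
    simp only [List.foldl_cons] at h
    rcases ih (pvStepB xs o x) j h with h1 | h1
    · rcases pvStepB_cases xs o x with h2 | h2
      · exact Or.inl (h2 ▸ h1)
      · rw [h2] at h1; simp at h1; right; simp [h1]
    · right; simp [h1]

lemma pvBest_ge (xs : List Int) (a b j : Int) (h : pvBest xs a b = some j) : a ≤ j := by
  rcases pvFoldB_mem xs _ _ _ h with h1 | h1
  · simp at h1
  · exact (PySem.List.mem_pyRange_one.mp h1).1

lemma pvW_succ (xs : List Int) (k : Int) (hk : 1 ≤ k) :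
    pvW xs (k + 1) =
      if PySem.List.pyGetD xs (pvW xs k) 0 < PySem.List.pyGetD xs k 0 then k else pvW xs k := by
  unfold pvW
  rw [PySem.List.pyRange_one_succ_right hk, List.foldl_append]
  simp

lemma pvW_bounds (xs : List Int) (d : Nat) :
    0 ≤ pvW xs (1 + (d : Int)) ∧ pvW xs (1 + (d : Int)) < 1 + (d : Int) := by
  induction d with
  | zero => simp [pvW, PySem.List.pyRange_one_eq_nil (by omega : (1:Int) ≤ 1)]
  | succ d ih =>
    have hc : (1 + ((d + 1 : Nat) : Int)) = (1 + (d : Int)) + 1 := by push_cast; ring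
    rw [hc, pvW_succ xs _ (by omega)]
    split_ifs <;> omega

lemma pvW_max (xs : List Int) (d : Nat) :
    (∀ j : Int, 0 ≤ j → j < 1 + (d : Int) → pvV xs j ≤ pvV xs (pvW xs (1 + (d : Int)))) ∧
    (∀ j : Int, 0 ≤ j → j < pvW xs (1 + (d : Int)) → pvV xs j < pvV xs (pvW xs (1 + (d : Int)))) := by
  induction d with
  | zero =>
    have h0 : pvW xs 1 = 0 := by
      simp [pvW, PySem.List.pyRange_one_eq_nil (by omega : (1:Int) ≤ 1)]
    push_cast
    rw [h0]
    constructor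
    · intro j h1 h2
      have : j = 0 := by omega
      simp [this]
    · intro j h1 h2; omega
  | succ d ih =>
    have hc : (1 + ((d + 1 : Nat) : Int)) = (1 + (d : Int)) + 1 := by push_cast; ring
    set k : Int := 1 + (d : Int) with hkdef
    rw [hc, pvW_succ xs k (by omega)]
    by_cases hr : PySem.List.pyGetD xs (pvW xs k) 0 < PySem.List.pyGetD xs k 0
    · rw [if_pos hr]
      constructor
      · intro j h1 h2
        by_cases hj : j < k
        · exact le_trans (ih.1 j h1 hj) (le_of_lt hr)
        · have : j = k := by omega
          simp [this, pvV]
      · intro j h1 h2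
        by_cases hj : j < pvW xs k
        · exact lt_trans (ih.2 j h1 hj) hr
        · -- pvW xs k ≤ j < k
          exact lt_of_le_of_lt (ih.1 j h1 h2) hr
    · rw [if_neg hr]
      constructor
      · intro j h1 h2
        by_cases hj : j < k
        · exact ih.1 j h1 hj
        · have : j = k := by omega
          rw [this]
          exact le_of_not_gt hr
      · exact ih.2

lemma pvMain (xs : List Int) (d : Nat) :
    pvStA xs (1 + (d : Int)) =
      (pvW xs (1 + (d : Int)), (pvBest xs (pvW xs (1 + (d : Int)) + 1) (1 + (d : Int))).getD 0) := by
  induction d with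
  | zero =>
    simp [pvStA, pvW, pvBest, PySem.List.pyRange_one_eq_nil (by omega : (1:Int) ≤ 1)]
  | succ d ih =>
    have hc : (1 + ((d + 1 : Nat) : Int)) = (1 + (d : Int)) + 1 := by push_cast; ring
    set k : Int := 1 + (d : Int) with hkdef
    have hbd := pvW_bounds xs d
    rw [hc]
    set w : Int := pvW xs k with hwdef
    have hstep : pvStA xs (k + 1) = pvStepA xs (pvStA xs k) k := by
      unfold pvStA
      rw [PySem.List.pyRange_one_succ_right (by omega : (1:Int) ≤ k), List.foldl_append]
      simp
    rw [hstep, ih, pvW_succ xs k (by omega)]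
    by_cases hr : PySem.List.pyGetD xs w 0 < PySem.List.pyGetD xs k 0
    · rw [if_pos hr]
      have hA : pvStepA xs (w, (pvBest xs (w + 1) k).getD 0) k = (k, 0) := by
        simp [pvStepA, hr]
      rw [hA]
      simp [pvBest, PySem.List.pyRange_one_eq_nil (by omega : k + 1 ≤ k + 1)]
    · rw [if_neg hr]
      have hsplit : pvBest xs (w + 1) (k + 1) = pvStepB xs (pvBest xs (w + 1) k) k := by
        unfold pvBest
        rw [PySem.List.pyRange_one_succ_right (by omega : w + 1 ≤ k), List.foldl_append]
        simp
      rw [hsplit]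
      cases ho : pvBest xs (w + 1) k with
      | none =>
        simp only [Option.getD_none]
        by_cases c1 : PySem.Int.mod (PySem.List.pyGetD xs k 0) 10 = 5 <;>
          by_cases c2 : k + 1 < (xs.length : Int) ∧
              PySem.List.pyGetD xs (k + 1) 0 < PySem.List.pyGetD xs k 0 <;>
          (simp [pvStepA, pvStepB, hr, c2];
            first
            | exact hwdef
            | exact ⟨hwdef, by split_ifs <;> simp⟩)
      | some j =>
        have hj : w + 1 ≤ j := pvBest_ge xs _ _ _ ho
        have hj0 : ¬ (j = 0) := by omega
        simp only [Option.getD_some]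
        by_cases c1 : PySem.Int.mod (PySem.List.pyGetD xs k 0) 10 = 5 <;>
          by_cases c2 : k + 1 < (xs.length : Int) ∧
              PySem.List.pyGetD xs (k + 1) 0 < PySem.List.pyGetD xs k 0 <;>
          by_cases c3 : PySem.List.pyGetD xs j 0 < PySem.List.pyGetD xs k 0 <;>
          (simp [pvStepA, pvStepB, hr, c2, c3, hj0];
            first
            | exact hwdef
            | exact ⟨hwdef, by split_ifs <;> simp⟩)

-- ===== VERDICT (by name: the statement is the Claim_ definition above) =====
theorem solution_spec : Claim_equal_solution := by
  intro xs _hdom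
  unfold Spec_solution
  by_cases hn : (xs.length : Int) < 2
  · have hA : solution xs = 0 := by
      have h0 : pvStA xs (xs.length : Int) = (0, 0) := by
        unfold pvStA
        rw [PySem.List.pyRange_one_eq_nil (by omega : (xs.length : Int) ≤ 1)]
        rfl
      show (if (pvStA xs (xs.length : Int)).2 = 0 then (0 : Int)
            else (PySem.List.pyRange 0 (xs.length : Int) 1).foldl
              (fun place i =>
                place +
                  (if PySem.List.pyGetD xs (pvStA xs (xs.length : Int)).2 0 <
                      PySem.List.pyGetD xs i 0 then 1 else 0)) 1) = 0
      rw [h0]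
      simp
    have hB : solution_alt xs = 0 := by
      simp only [solution_alt]
      rw [if_pos hn]
    rw [hA, hB]
  · obtain ⟨mx, hmax⟩ : ∃ mx, PySem.List.max? xs (fun x => x) = some mx := by
      cases hm : PySem.List.max? xs (fun x => x) with
      | none =>
        exfalso
        rw [PySem.List.max?_eq_none_iff] at hm
        subst hm; simp at hn
      | some mx => exact ⟨mx, rfl⟩
    have hmem : mx ∈ xs := PySem.List.max?_mem hmax
    obtain ⟨m, hidx⟩ : ∃ m, PySem.List.index? xs mx = some m := by
      have hs := (PySem.List.index?_isSome_iff xs mx).mpr hmem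
      cases hi : PySem.List.index? xs mx with
      | none => rw [hi] at hs; simp at hs
      | some m => exact ⟨m, rfl⟩
    obtain ⟨hmlt, hmval, hmfirst⟩ := PySem.List.getElem_of_index?_eq_some hidx
    have hdn : 1 + ((xs.length - 1 : Nat) : Int) = (xs.length : Int) := by omega
    have hw := pvW_max xs (xs.length - 1)
    have hwb := pvW_bounds xs (xs.length - 1)
    have hMain := pvMain xs (xs.length - 1)
    rw [hdn] at hw hwb hMain
    have hvw : pvV xs (pvW xs (xs.length : Int)) ∈ xs := by
      rw [pvV, PySem.List.pyGetD_eq_getElem xs 0 hwb.1 hwb.2]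
      exact List.getElem_mem _
    have hle1 : pvV xs (pvW xs (xs.length : Int)) ≤ mx := PySem.List.max?_isMax hmax _ hvw
    have hvm : pvV xs (m : Int) = mx := by
      rw [pvV, PySem.List.pyGetD_natCast, List.getD_eq_getElem xs 0 hmlt, hmval]
    have hle2 : pvV xs (m : Int) ≤ pvV xs (pvW xs (xs.length : Int)) :=
      hw.1 (m : Int) (by omega) (by exact_mod_cast hmlt)
    have hvweq : pvV xs (pvW xs (xs.length : Int)) = mx :=
      le_antisymm hle1 (hvm ▸ hle2)
    have hwm : pvW xs (xs.length : Int) = (m : Int) := by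
      rcases lt_trichotomy (pvW xs (xs.length : Int)) (m : Int) with h | h | h
      · exfalso
        have hwn : (pvW xs (xs.length : Int)).toNat < m := by omega
        refine hmfirst _ hwn ?_
        rw [← PySem.List.pyGetD_eq_getElem xs 0 hwb.1 hwb.2]
        exact hvweq
      · exact h
      · exfalso
        have hlt := hw.2 (m : Int) (by omega) h
        rw [hvm, hvweq] at hlt
        exact lt_irrefl _ hlt
    have hA : solution xs =
        (if (pvStA xs (xs.length : Int)).2 = 0 then 0
         else (PySem.List.pyRange 0 (xs.length : Int) 1).foldl
           (fun place i =>
             place +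
               (if PySem.List.pyGetD xs (pvStA xs (xs.length : Int)).2 0 <
                   PySem.List.pyGetD xs i 0 then 1 else 0)) 1) := rfl
    have hB : solution_alt xs =
        (match pvBest xs ((m : Int) + 1) (xs.length : Int) with
         | none => 0
         | some j =>
           1 + ((xs.countP (fun c => decide (PySem.List.pyGetD xs j 0 < c)) : Nat) : Int)) := by
      simp only [solution_alt, hmax, hidx]
      rw [if_neg hn]
      rfl
    rw [hA, hB, hMain, hwm]
    cases hbo : pvBest xs ((m : Int) + 1) (xs.length : Int) with
    | none => simp
    | some j =>
      have hj1 : (m : Int) + 1 ≤ j := pvBest_ge xs _ _ _ hbo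
      simp only [Option.getD_some]
      rw [if_neg (by omega : ¬ (j = 0))]
      refine (PySem.List.foldl_pyRange_zero_pyGetD' xs (0 : Int)
        (fun acc c => acc + if PySem.List.pyGetD xs j 0 < c then (1 : Int) else 0) 1).trans ?_
      refine (PySem.List.foldl_add xs
        (fun c => if PySem.List.pyGetD xs j 0 < c then (1 : Int) else 0) 1).trans ?_
      have hdec : (fun c => if PySem.List.pyGetD xs j 0 < c then (1 : Int) else 0) =
          (fun c => if decide (PySem.List.pyGetD xs j 0 < c) = true then (1 : Int) else 0) := by
        funext c; simp
      rw [hdec, PySem.List.sum_map_ite_one_zero]
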